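-- pv_equiv track=rewrite | github.com/nascarsayan/lintcode | 761.py | minElements
-- ===== SOURCE A (Python) =====
-- import heapq
--
-- def minElements(arr):
--   # write your code here
--   tot = sum(arr)
--   if tot == 0:
--     return len(arr)
--   arr2 = list(map(lambda x: (-x, x), arr))
--   heapq.heapify(arr2)
--   maxs, n = 0, 0
--   while (len(arr2) > 0):
--     maxs += heapq.heappop(arr2)[1]
--     n += 1
--     if maxs > (tot - maxs):
--       return n
--   return n
-- ===== SOURCE B (Python) =====
-- def minElements(arr):
--   tot = sum(arr)
--   if tot == 0:
--     return len(arr)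
--   maxs, n = 0, 0
--   for x in sorted(arr, reverse=True):
--     maxs += x
--     n += 1
--     if maxs > tot - maxs:
--       return n
--   return n
-- ===== Notes on version B (the rewrite author's own statement) =====
-- stated objective: simpler
-- what changed: Replaces the heapify-and-repeated-heappop loop over negated pairs with a single non-mutating descending sort followed by one accumulate-and-test scan.
import Mathlib
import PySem

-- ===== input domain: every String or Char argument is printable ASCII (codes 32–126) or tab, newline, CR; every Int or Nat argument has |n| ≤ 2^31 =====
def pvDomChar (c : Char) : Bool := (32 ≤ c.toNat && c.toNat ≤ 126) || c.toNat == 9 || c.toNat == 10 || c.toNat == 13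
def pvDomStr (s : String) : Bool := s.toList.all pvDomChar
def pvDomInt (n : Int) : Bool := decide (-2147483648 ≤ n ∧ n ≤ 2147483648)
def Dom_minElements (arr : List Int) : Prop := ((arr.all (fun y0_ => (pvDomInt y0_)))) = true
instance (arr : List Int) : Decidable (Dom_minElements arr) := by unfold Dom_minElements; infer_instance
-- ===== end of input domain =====

-- B replaces heapify + repeated heappop of negated pairs with one descending sort and a single scan (simpler).

-- ===== PORT A =====
-- A's heap of pairs is modelled as a priority queue: heappop = extract the
-- lexicographically least pair (first occurrence) — exactly the value heapq
-- returns on each pop; the heap's internal array layout is not observable.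
def popMin : List (Int × Int) → Option ((Int × Int) × List (Int × Int))
  | [] => none
  | p :: ps =>
    match popMin ps with
    | none => some (p, [])
    | some (q, rest) =>
      if p.1 < q.1 ∨ (p.1 = q.1 ∧ p.2 ≤ q.2) then some (p, ps) else some (q, p :: rest)

-- the while-loop of A: pop, accumulate, test; fuel = initial heap size
def heapLoop : Nat → List (Int × Int) → Int → Int → Int → Int
  | 0, _, _, _, n => n
  | fuel + 1, heap, tot, maxs, n =>
    match popMin heap with
    | none => n
    | some (p, rest) =>
      let maxs' := maxs + p.2
      let n' := n + 1
      if maxs' > tot - maxs' then n' else heapLoop fuel rest tot maxs' n'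

def minElements (arr : List Int) : Int :=
  let tot := arr.sum
  if tot = 0 then (arr.length : Int)
  else heapLoop arr.length (arr.map (fun x => (-x, x))) tot 0 0

-- ===== PORT B =====
def descLoop : List Int → Int → Int → Int → Int
  | [], _, _, n => n
  | x :: xs, tot, maxs, n =>
    let maxs' := maxs + x
    let n' := n + 1
    if maxs' > tot - maxs' then n' else descLoop xs tot maxs' n'

def minElements_alt (arr : List Int) : Int :=
  let tot := arr.sum
  if tot = 0 then (arr.length : Int)
  else descLoop (PySem.List.sorted arr (fun x => x) true) tot 0 0

-- ===== PRECONDITION & SPEC =====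
def Spec_minElements (arr : List Int) (out : Int) : Prop := out = minElements_alt arr
instance (arr : List Int) (out : Int) : Decidable (Spec_minElements arr out) := by unfold Spec_minElements; infer_instance

-- ===== CLAIM (what is proved, stated in full; the proofs are below) =====
def Claim_equal_minElements : Prop := ∀ (arr : List Int), Dom_minElements arr → Spec_minElements arr (minElements arr)

-- ===== LEMMAS AND PROOFS =====

-- popMin on the negated-pair image of l pops the (first occurrence of the) maximum value of l
lemma popMin_spec : ∀ (l : List Int), l ≠ [] → ∃ m, m ∈ l ∧ (∀ y ∈ l, y ≤ m) ∧
    popMin (l.map (fun x => (-x, x))) = some ((-m, m), (l.erase m).map (fun x => (-x, x))) := by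
  intro l
  induction l with
  | nil => intro h; exact absurd rfl h
  | cons x xs ih =>
    intro _
    cases xs with
    | nil =>
      refine ⟨x, List.mem_singleton.mpr rfl, ?_, ?_⟩
      · intro y hy; simp at hy; omega
      · simp [popMin]
    | cons z zs =>
      obtain ⟨m', hm'mem, hm'max, hpop⟩ := ih (by simp)
      by_cases hx : m' ≤ x
      · refine ⟨x, List.mem_cons_self, ?_, ?_⟩
        · intro y hy
          rcases List.mem_cons.mp hy with h | h
          · omega
          · have := hm'max y h; omega
        · simp only [List.map_cons] at hpop ⊢
          rw [popMin, hpop]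
          have hcond : (-x < -m' ∨ (-x = -m' ∧ x ≤ m')) := by omega
          simp only [if_pos hcond]
          have : (x :: z :: zs).erase x = z :: zs := List.erase_cons_head x (z :: zs)
          rw [this]; simp
      · push Not at hx
        refine ⟨m', List.mem_cons_of_mem x hm'mem, ?_, ?_⟩
        · intro y hy
          rcases List.mem_cons.mp hy with h | h
          · omega
          · exact hm'max y h
        · simp only [List.map_cons] at hpop ⊢
          rw [popMin, hpop]
          have hcond : ¬(-x < -m' ∨ (-x = -m' ∧ x ≤ m')) := by omega
          simp only [if_neg hcond]
          have hne : x ≠ m' := by omega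
          have : (x :: z :: zs).erase m' = x :: (z :: zs).erase m' :=
            List.erase_cons_tail (by simp [hne])
          rw [this]
          simp

-- the descending Python sort of l starts with its maximum, followed by the sort of the rest
lemma sorted_desc_cons (l : List Int) (m : Int) (hm : m ∈ l) (hmax : ∀ y ∈ l, y ≤ m) :
    PySem.List.sorted l (fun x => x) true = m :: PySem.List.sorted (l.erase m) (fun x => x) true := by
  apply List.Perm.eq_of_pairwise (le := fun a b : Int => b ≤ a)
  · intro a b _ _ h1 h2; omega
  · exact PySem.List.sorted_pairwise_rev l (fun x => x)
  · rw [List.pairwise_cons]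
    refine ⟨?_, PySem.List.sorted_pairwise_rev (l.erase m) (fun x => x)⟩
    intro b hb
    exact hmax b (List.mem_of_mem_erase ((PySem.List.mem_sorted (l.erase m) (fun x => x) true b).mp hb))
  · exact (PySem.List.sorted_perm l (fun x => x) true).trans
      ((List.perm_cons_erase hm).trans
        (List.Perm.cons m (PySem.List.sorted_perm (l.erase m) (fun x => x) true).symm))

lemma heapLoop_eq : ∀ (fuel : Nat) (l : List Int), l.length ≤ fuel → ∀ (tot maxs n : Int),
    heapLoop fuel (l.map (fun x => (-x, x))) tot maxs n
      = descLoop (PySem.List.sorted l (fun x => x) true) tot maxs n := by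
  intro fuel
  induction fuel with
  | zero =>
    intro l hl tot maxs n
    have : l = [] := List.eq_nil_of_length_eq_zero (Nat.le_zero.mp hl)
    subst this
    have hs : PySem.List.sorted ([] : List Int) (fun x => x) true = [] :=
      List.Perm.eq_nil (PySem.List.sorted_perm [] (fun x => x) true)
    simp [heapLoop, hs, descLoop]
  | succ fuel ih =>
    intro l hl tot maxs n
    cases l with
    | nil =>
      have hs : PySem.List.sorted ([] : List Int) (fun x => x) true = [] :=
        List.Perm.eq_nil (PySem.List.sorted_perm [] (fun x => x) true)
      simp [heapLoop, popMin, hs, descLoop]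
    | cons x xs =>
      obtain ⟨m, hmem, hmax, hpop⟩ := popMin_spec (x :: xs) (by simp)
      rw [sorted_desc_cons (x :: xs) m hmem hmax]
      rw [heapLoop, hpop, descLoop]
      simp only []
      by_cases hstop : maxs + m > tot - (maxs + m)
      · simp [hstop]
      · simp only [if_neg hstop]
        apply ih
        rw [List.length_erase_of_mem hmem]
        simp only [List.length_cons] at hl ⊢
        omega

-- ===== VERDICT (by name: the statement is the Claim_ definition above) =====
theorem minElements_spec : Claim_equal_minElements := by
  intro arr _
  unfold Spec_minElements minElements minElements_alt
  by_cases h : arr.sum = 0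
  · simp [h]
  · simp only [if_neg h]
    exact heapLoop_eq arr.length arr le_rfl arr.sum 0 0
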